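-- pv_equiv track=rewrite | github.com/Priyeshpandey/local_rep | subarrCount.py | subarrCount
-- ===== SOURCE A (Python) =====
-- def subarrCount(arr):
--     n = len(arr)
--     max_ = max(arr)
--     i, j = 0, n-1
--     count = 0
--     for i in range(n):
--         if arr[i] < max_//2:
--             count+=1
--         else:
--             break
--
--     for j in range(n):
--         if arr[n-j-1] < max_//2:
--             count+=1
--         else:
--             break
--
--     return i*(n-j-1)
-- ===== SOURCE B (Python) =====
-- def subarrCount(arr):
--     t = max(arr) // 2
--     idx = [i for i, x in enumerate(arr) if x >= t]
--     return idx[0] * idx[-1] if idx else 0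
-- ===== Notes on version B (the rewrite author's own statement) =====
-- stated objective: simpler
-- what changed: Replaces A's two directional index loops with dead count bookkeeping by one enumerate pass collecting qualifying indices and multiplying the first by the last.
import Mathlib
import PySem

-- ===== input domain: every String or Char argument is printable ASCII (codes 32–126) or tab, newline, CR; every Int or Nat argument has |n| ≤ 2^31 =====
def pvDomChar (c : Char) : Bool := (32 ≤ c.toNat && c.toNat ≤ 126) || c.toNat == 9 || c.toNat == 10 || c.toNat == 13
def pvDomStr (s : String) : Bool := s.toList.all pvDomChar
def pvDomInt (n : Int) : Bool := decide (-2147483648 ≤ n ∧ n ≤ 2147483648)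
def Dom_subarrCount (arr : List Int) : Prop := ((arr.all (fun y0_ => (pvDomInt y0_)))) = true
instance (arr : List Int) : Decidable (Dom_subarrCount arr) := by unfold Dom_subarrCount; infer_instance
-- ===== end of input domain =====

-- B replaces A's two directional break-loops (whose count is dead state) by one
-- enumerate pass collecting the qualifying indices; objective: simpler.

-- ===== PORT A =====
-- first for-loop: i takes each k of range(n); break at the first arr[i] >= max_//2
def pvLoop1 (arr : List Int) (t : Int) : List Int → Int → Int → Int × Int
  | [], prev, c => (prev, c)
  | k :: ks, _prev, c =>
      if PySem.List.pyGetD arr k 0 < t then pvLoop1 arr t ks k (c + 1) else (k, c)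

-- second for-loop: same, indexing arr[n - j - 1]
def pvLoop2 (arr : List Int) (t n : Int) : List Int → Int → Int → Int × Int
  | [], prev, c => (prev, c)
  | k :: ks, _prev, c =>
      if PySem.List.pyGetD arr (n - k - 1) 0 < t then pvLoop2 arr t n ks k (c + 1) else (k, c)

def subarrCount (arr : List Int) : Int :=
  let n : Int := arr.length
  let max_ : Int := (PySem.List.max? arr (fun x => x)).getD 0
  let ic := pvLoop1 arr (PySem.Int.floordiv max_ 2) (PySem.List.pyRange 0 n 1) 0 0
  let jc := pvLoop2 arr (PySem.Int.floordiv max_ 2) n (PySem.List.pyRange 0 n 1) (n - 1) ic.2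
  ic.1 * (n - jc.1 - 1)

-- ===== PORT B =====
def subarrCount_alt (arr : List Int) : Int :=
  let t := PySem.Int.floordiv ((PySem.List.max? arr (fun x => x)).getD 0) 2
  let idx := ((PySem.List.enumerate arr 0).filter (fun p => decide (t ≤ p.2))).map (fun p => p.1)
  match idx with
  | [] => 0
  | x :: xs => x * (x :: xs).getLast (by simp)

-- ===== PRECONDITION & SPEC =====
-- Pre_ excludes only the empty list, on which Python's max(arr) raises ValueError (in both A and B).
def Pre_subarrCount (arr : List Int) : Prop := arr ≠ []
instance (arr : List Int) : Decidable (Pre_subarrCount arr) := by unfold Pre_subarrCount; infer_instance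
def pvWitness_subarrCount : List Int := ([1, 2, 3] : List Int)

def Spec_subarrCount (arr : List Int) (out : Int) : Prop := out = subarrCount_alt arr
instance (arr : List Int) (out : Int) : Decidable (Spec_subarrCount arr out) := by unfold Spec_subarrCount; infer_instance

-- ===== CLAIM (what is proved, stated in full; the proofs are below) =====
def Claim_equal_subarrCount : Prop := ∀ (arr : List Int), Dom_subarrCount arr → Pre_subarrCount arr → Spec_subarrCount arr (subarrCount arr)

-- ===== LEMMAS AND PROOFS =====

-- index of the first element ≥ t
def pvFirstQ (t : Int) : List Int → Option Nat
  | [] => none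
  | x :: xs => if t ≤ x then some 0 else (pvFirstQ t xs).map (· + 1)

-- index of the last element ≥ t
def pvLastQ (t : Int) : List Int → Option Nat
  | [] => none
  | x :: xs =>
      match pvLastQ t xs with
      | some m => some (m + 1)
      | none => if t ≤ x then some 0 else none

theorem pvFirstQ_lt_length (t : Int) (l : List Int) (m : Nat) (h : pvFirstQ t l = some m) :
    m < l.length := by
  induction l generalizing m with
  | nil => simp [pvFirstQ] at h
  | cons x xs ih =>
      simp only [pvFirstQ] at h
      split_ifs at h
      · obtain rfl : (0 : Nat) = m := by simpa using h
        simp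
      · rcases Option.map_eq_some_iff.mp h with ⟨m', hm', rfl⟩
        have := ih m' hm'
        simp; omega

theorem pvFirstQ_eq_none_iff (t : Int) (l : List Int) :
    pvFirstQ t l = none ↔ ∀ x ∈ l, x < t := by
  induction l with
  | nil => simp [pvFirstQ]
  | cons x xs ih =>
      simp only [pvFirstQ]
      split_ifs with h
      · simp; intro h'; omega
      · simp [Option.map_eq_none_iff, ih]; intro _; omega

theorem pvFirstQ_append (t : Int) (u v : List Int) :
    pvFirstQ t (u ++ v) =
      match pvFirstQ t u with
      | some m => some m
      | none => (pvFirstQ t v).map (· + u.length) := by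
  induction u with
  | nil => simp [pvFirstQ]
  | cons x xs ih =>
      simp only [List.cons_append, pvFirstQ, ih]
      split_ifs with h
      · rfl
      · cases hx : pvFirstQ t xs with
        | some m => simp
        | none =>
            simp only [Option.map_map]
            cases pvFirstQ t v <;> simp

theorem pvLastQ_eq_rev (t : Int) (l : List Int) :
    pvLastQ t l = (pvFirstQ t l.reverse).map (fun m => l.length - 1 - m) := by
  induction l with
  | nil => simp [pvLastQ, pvFirstQ]
  | cons x xs ih =>
      simp only [pvLastQ, List.reverse_cons, pvFirstQ_append, ih]
      cases hx : pvFirstQ t xs.reverse with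
      | some m =>
          have hm : m < xs.length := by
            have := pvFirstQ_lt_length t xs.reverse m hx
            simpa using this
          simp only [Option.map_some]
          simp only [List.length_cons]
          congr 1
          omega
      | none =>
          simp only [Option.map_none, pvFirstQ]
          split_ifs with h
          · simp [List.length_reverse]
          · simp

-- characterisation of A's first loop
theorem pvLoop1_char (l : List Int) (t : Int) :
    ∀ (a : Nat) (prev c : Int), a ≤ l.length →
      (pvLoop1 l t (PySem.List.pyRange (a : Int) (l.length : Int) 1) prev c).1 =
        match pvFirstQ t (l.drop a) with
        | some m => ((a + m : Nat) : Int)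
        | none => if a = l.length then prev else ((l.length : Int) - 1) := by
  intro a
  induction hk : l.length - a generalizing a with
  | zero =>
      intro prev c ha
      have : a = l.length := by omega
      subst this
      rw [PySem.List.pyRange_one_eq_nil (by omega)]
      simp [pvLoop1, pvFirstQ]
  | succ k ih =>
      intro prev c ha
      have hlt : a < l.length := by omega
      rw [PySem.List.pyRange_one_cons (by exact_mod_cast hlt)]
      have hget : PySem.List.pyGetD l (a : Int) 0 = l[a] := by
        rw [PySem.List.pyGetD_natCast]
        exact List.getD_eq_getElem l 0 hlt
      have hdrop : l.drop a = l[a] :: l.drop (a + 1) :=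
        (List.getElem_cons_drop hlt).symm
      simp only [pvLoop1, hget]
      by_cases h : l[a] < t
      · rw [if_pos h]
        have hc : ((a : Int) + 1) = ((a + 1 : Nat) : Int) := by push_cast; ring
        rw [hc, ih (a + 1) (by omega) (a : Int) (c + 1) (by omega)]
        rw [hdrop]
        simp only [pvFirstQ, if_neg (by omega : ¬ t ≤ l[a])]
        cases hx : pvFirstQ t (l.drop (a + 1)) with
        | some m => simp; ring
        | none =>
            simp only [Option.map_none]
            rcases Nat.eq_or_lt_of_le (show a + 1 ≤ l.length by omega) with heq | hlt2
            · rw [if_pos heq, if_neg (show ¬ a = l.length by omega)]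
              omega
            · rw [if_neg (show ¬ a + 1 = l.length by omega),
                  if_neg (show ¬ a = l.length by omega)]
      · rw [if_neg h]
        rw [hdrop]
        simp only [pvFirstQ, if_pos (by omega : t ≤ l[a])]
        simp

-- characterisation of A's second loop: it scans l.reverse
theorem pvLoop2_char (l : List Int) (t : Int) :
    ∀ (a : Nat) (prev c : Int), a ≤ l.length →
      (pvLoop2 l t (l.length : Int) (PySem.List.pyRange (a : Int) (l.length : Int) 1) prev c).1 =
        match pvFirstQ t (l.reverse.drop a) with
        | some m => ((a + m : Nat) : Int)
        | none => if a = l.length then prev else ((l.length : Int) - 1) := by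
  intro a
  induction hk : l.length - a generalizing a with
  | zero =>
      intro prev c ha
      have : a = l.length := by omega
      subst this
      rw [PySem.List.pyRange_one_eq_nil (by omega)]
      have hd : l.reverse.drop l.length = [] := by
        apply List.drop_eq_nil_of_le; simp
      simp [pvLoop2, hd, pvFirstQ]
  | succ k ih =>
      intro prev c ha
      have hlt : a < l.length := by omega
      rw [PySem.List.pyRange_one_cons (by exact_mod_cast hlt)]
      have hrl : a < l.reverse.length := by simpa using hlt
      have hget : PySem.List.pyGetD l ((l.length : Int) - (a : Int) - 1) 0 = l.reverse[a] := by
        rw [PySem.List.pyGetD_eq_getElem l 0 (by omega) (by omega)]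
        rw [List.getElem_reverse]
        congr 1
        omega
      have hdrop : l.reverse.drop a = l.reverse[a] :: l.reverse.drop (a + 1) :=
        (List.getElem_cons_drop hrl).symm
      simp only [pvLoop2, hget]
      by_cases h : l.reverse[a] < t
      · rw [if_pos h]
        have hc : ((a : Int) + 1) = ((a + 1 : Nat) : Int) := by push_cast; ring
        rw [hc, ih (a + 1) (by omega) (a : Int) (c + 1) (by omega)]
        rw [hdrop]
        simp only [pvFirstQ, if_neg (by omega : ¬ t ≤ l.reverse[a])]
        cases hx : pvFirstQ t (l.reverse.drop (a + 1)) with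
        | some m => simp; ring
        | none =>
            simp only [Option.map_none]
            rcases Nat.eq_or_lt_of_le (show a + 1 ≤ l.length by omega) with heq | hlt2
            · rw [if_pos heq, if_neg (show ¬ a = l.length by omega)]
              omega
            · rw [if_neg (show ¬ a + 1 = l.length by omega),
                  if_neg (show ¬ a = l.length by omega)]
      · rw [if_neg h]
        rw [hdrop]
        simp only [pvFirstQ, if_pos (by omega : t ≤ l.reverse[a])]
        simp

-- B's index list: head and last element
theorem pvIdx_head (t : Int) (l : List Int) (s : Int) :
    (((PySem.List.enumerate l s).filter (fun p => decide (t ≤ p.2))).map (fun p => p.1)).head? =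
      (pvFirstQ t l).map (fun m => s + (m : Int)) := by
  induction l generalizing s with
  | nil => simp [PySem.List.enumerate_nil, pvFirstQ]
  | cons x xs ih =>
      rw [PySem.List.enumerate_cons]
      by_cases h : t ≤ x
      · rw [List.filter_cons_of_pos (by simpa using h)]
        simp [pvFirstQ, h]
      · rw [List.filter_cons_of_neg (by simpa using h), ih]
        simp only [pvFirstQ, if_neg h]
        cases pvFirstQ t xs with
        | some m => simp; ring
        | none => simp

theorem pvIdx_last (t : Int) (l : List Int) (s : Int) :
    (((PySem.List.enumerate l s).filter (fun p => decide (t ≤ p.2))).map (fun p => p.1)).getLast? =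
      (pvLastQ t l).map (fun m => s + (m : Int)) := by
  induction l generalizing s with
  | nil => simp [PySem.List.enumerate_nil, pvLastQ]
  | cons x xs ih =>
      rw [PySem.List.enumerate_cons]
      by_cases h : t ≤ x
      · rw [List.filter_cons_of_pos (by simpa using h), List.map_cons, List.getLast?_cons, ih]
        simp only [pvLastQ]
        cases pvLastQ t xs with
        | some m => simp; ring
        | none => simp [h]
      · rw [List.filter_cons_of_neg (by simpa using h), ih]
        simp only [pvLastQ]
        cases pvLastQ t xs with
        | some m => simp; ring
        | none => simp [h]

theorem pvFirstQ_spec (t : Int) (l : List Int) (m : Nat) (h : pvFirstQ t l = some m) :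
    ∃ (hm : m < l.length), t ≤ l[m] := by
  induction l generalizing m with
  | nil => simp [pvFirstQ] at h
  | cons y ys ih =>
      simp only [pvFirstQ] at h
      by_cases hy : t ≤ y
      · rw [if_pos hy] at h
        obtain rfl : (0 : Nat) = m := by simpa using h
        exact ⟨by simp, by simpa using hy⟩
      · rw [if_neg hy] at h
        rcases Option.map_eq_some_iff.mp h with ⟨m', hm', rfl⟩
        obtain ⟨hlt, hle⟩ := ih m' hm'
        exact ⟨by simpa using Nat.succ_lt_succ hlt, by simpa using hle⟩

-- ===== VERDICT (by name: the statement is the Claim_ definition above) =====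
theorem subarrCount_spec : Claim_equal_subarrCount := by
  unfold Claim_equal_subarrCount
  intro arr _hdom hpre
  unfold Pre_subarrCount at hpre
  unfold Spec_subarrCount
  have hlen : 0 < arr.length := List.length_pos_of_ne_nil hpre
  simp only [subarrCount, subarrCount_alt]
  set t := PySem.Int.floordiv ((PySem.List.max? arr (fun x => x)).getD 0) 2 with ht
  have h1 := pvLoop1_char arr t 0 0 0 (by omega)
  have h2 := pvLoop2_char arr t 0 ((arr.length : Int) - 1)
      (pvLoop1 arr t (PySem.List.pyRange ((0 : Nat) : Int) ((arr.length : Nat) : Int) 1) 0 0).2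
      (by omega)
  norm_num at h1 h2
  cases hfq : pvFirstQ t arr with
  | none =>
      have hall : ∀ x ∈ arr, x < t := (pvFirstQ_eq_none_iff t arr).mp hfq
      have hrev : pvFirstQ t arr.reverse = none := by
        rw [pvFirstQ_eq_none_iff]
        intro x hx
        exact hall x (List.mem_reverse.mp hx)
      rw [hfq] at h1
      rw [hrev] at h2
      simp only [if_neg (show ¬ (0 : Nat) = arr.length by omega)] at h1 h2
      have hidx : ((PySem.List.enumerate arr 0).filter
          (fun p => decide (t ≤ p.2))).map (fun p => p.1) = [] := by
        apply List.head?_eq_none_iff.mp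
        rw [pvIdx_head, hfq]
        rfl
      rw [hidx, h1, h2]
      ring
  | some L =>
      cases hrev : pvFirstQ t arr.reverse with
      | none =>
          exfalso
          obtain ⟨hL, hLe⟩ := pvFirstQ_spec t arr L hfq
          have : arr[L] < t := (pvFirstQ_eq_none_iff t arr.reverse).mp hrev arr[L]
              (List.mem_reverse.mpr (List.getElem_mem hL))
          omega
      | some M =>
          have hM : M < arr.length := by
            have := pvFirstQ_lt_length t arr.reverse M hrev
            simpa using this
          rw [hfq] at h1
          rw [hrev] at h2
          have hhead := pvIdx_head t arr 0
          rw [hfq] at hhead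
          have hlast := pvIdx_last t arr 0
          rw [pvLastQ_eq_rev, hrev] at hlast
          simp only [Option.map_some, zero_add] at hhead hlast
          cases hidx : ((PySem.List.enumerate arr 0).filter
              (fun p => decide (t ≤ p.2))).map (fun p => p.1) with
          | nil =>
              rw [hidx] at hhead
              simp at hhead
          | cons x xs =>
              rw [hidx] at hhead hlast
              have hx : x = (L : Int) := by simpa using hhead
              have hgl : ∀ (hne : x :: xs ≠ []),
                  (x :: xs).getLast hne = ((arr.length - 1 - M : Nat) : Int) := by
                intro hne
                have hq := List.getLast?_eq_some_getLast (l := x :: xs) hne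
                rw [hq] at hlast
                simpa using hlast
              rw [h1, h2]
              show (L : Int) * ((arr.length : Int) - (M : Int) - 1) =
                x * (x :: xs).getLast (by simp)
              rw [hgl, hx]
              congr 1
              omega
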